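-- pv_equiv track=rewrite | github.com/sobieniowski-boop/ACC | apps/api/app/services/content_ops/compliance.py | _preflight_recommendations
-- ===== SOURCE A (Python) =====
-- def _preflight_recommendations(blockers: list[str], warnings: list[str]) -> list[str]:
--     actions: list[str] = []
--     if any("missing_pim_data" in b for b in blockers):
--         actions.append("Uzupelnij dane PIM (brand/title/ean/category) przed publikacja.")
--     if any("family_coverage" in b for b in blockers):
--         actions.append("Domknij parent-child na rynkach docelowych na bazie DE canonical.")
--     if any("spapi_not_configured" in b for b in blockers):
--         actions.append("Skonfiguruj SP-API credentials w ACC, bo gate restrictions/catalog jest natywny.")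
--     if any("listing_requires_approval" in b or "listing_blocked" in b for b in blockers):
--         actions.append("Rozwiaz ograniczenia listingowe (approval lub blokada) przed push.")
--     if any("catalog" in b for b in blockers):
--         actions.append("Zweryfikuj dopasowanie katalogowe (ASIN/EAN) przed publikacja.")
--     if not actions:
--         actions.append("Gotowe do produkcji draftu i review QA.")
--     return actions
-- ===== SOURCE B (Python) =====
-- def _preflight_recommendations(blockers: list[str], warnings: list[str]) -> list[str]:
--     # One fused pass over blockers building five category flags, then fixed-order emission.
--     f = [False, False, False, False, False]
--     for b in blockers:
--         if "missing_pim_data" in b: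
--             f[0] = True
--         if "family_coverage" in b:
--             f[1] = True
--         if "spapi_not_configured" in b:
--             f[2] = True
--         if "listing_requires_approval" in b or "listing_blocked" in b:
--             f[3] = True
--         if "catalog" in b:
--             f[4] = True
--     msgs = [
--         "Uzupelnij dane PIM (brand/title/ean/category) przed publikacja.",
--         "Domknij parent-child na rynkach docelowych na bazie DE canonical.",
--         "Skonfiguruj SP-API credentials w ACC, bo gate restrictions/catalog jest natywny.",
--         "Rozwiaz ograniczenia listingowe (approval lub blokada) przed push.",
--         "Zweryfikuj dopasowanie katalogowe (ASIN/EAN) przed publikacja.",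
--     ]
--     actions = [m for flag, m in zip(f, msgs) if flag]
--     return actions or ["Gotowe do produkcji draftu i review QA."]
-- ===== Notes on version B (the rewrite author's own statement) =====
-- stated objective: alternative
-- what changed: Replaces five separate any(...) scans of blockers with one fused pass that builds five boolean flags, then emits the messages from a flag/message table in the fixed order.
import Mathlib
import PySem

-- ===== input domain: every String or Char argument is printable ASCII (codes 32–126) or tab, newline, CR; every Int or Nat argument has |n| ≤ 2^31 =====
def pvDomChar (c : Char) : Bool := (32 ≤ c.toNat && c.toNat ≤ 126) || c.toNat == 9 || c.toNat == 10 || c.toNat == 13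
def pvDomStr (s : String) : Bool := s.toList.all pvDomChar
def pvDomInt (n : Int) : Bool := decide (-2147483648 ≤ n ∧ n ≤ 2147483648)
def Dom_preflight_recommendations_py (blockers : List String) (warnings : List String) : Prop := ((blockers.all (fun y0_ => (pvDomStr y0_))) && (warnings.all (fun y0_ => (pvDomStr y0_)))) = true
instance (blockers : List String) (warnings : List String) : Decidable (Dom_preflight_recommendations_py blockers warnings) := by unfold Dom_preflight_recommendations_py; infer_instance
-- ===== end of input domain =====

-- ===== PORT A =====
-- B fuses A's five any(...) scans into one pass building five flags; same output, stated order preserved.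
def preflight_recommendations_py (blockers : List String) (warnings : List String) : List String :=
  let actions : List String := []
  let actions := if blockers.any (fun b => PySem.Str.isIn "missing_pim_data" b) then
      actions ++ ["Uzupelnij dane PIM (brand/title/ean/category) przed publikacja."] else actions
  let actions := if blockers.any (fun b => PySem.Str.isIn "family_coverage" b) then
      actions ++ ["Domknij parent-child na rynkach docelowych na bazie DE canonical."] else actions
  let actions := if blockers.any (fun b => PySem.Str.isIn "spapi_not_configured" b) then
      actions ++ ["Skonfiguruj SP-API credentials w ACC, bo gate restrictions/catalog jest natywny."] else actions
  let actions := if blockers.any (fun b => PySem.Str.isIn "listing_requires_approval" b || PySem.Str.isIn "listing_blocked" b) then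
      actions ++ ["Rozwiaz ograniczenia listingowe (approval lub blokada) przed push."] else actions
  let actions := if blockers.any (fun b => PySem.Str.isIn "catalog" b) then
      actions ++ ["Zweryfikuj dopasowanie katalogowe (ASIN/EAN) przed publikacja."] else actions
  let actions := if actions = [] then actions ++ ["Gotowe do produkcji draftu i review QA."] else actions
  actions

-- ===== PORT B =====
def pvStep (f : Bool × Bool × Bool × Bool × Bool) (b : String) : Bool × Bool × Bool × Bool × Bool :=
  let f := if PySem.Str.isIn "missing_pim_data" b then (true, f.2) else f
  let f := if PySem.Str.isIn "family_coverage" b then (f.1, true, f.2.2) else f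
  let f := if PySem.Str.isIn "spapi_not_configured" b then (f.1, f.2.1, true, f.2.2.2) else f
  let f := if PySem.Str.isIn "listing_requires_approval" b || PySem.Str.isIn "listing_blocked" b then
      (f.1, f.2.1, f.2.2.1, true, f.2.2.2.2) else f
  let f := if PySem.Str.isIn "catalog" b then (f.1, f.2.1, f.2.2.1, f.2.2.2.1, true) else f
  f

def preflight_recommendations_py_alt (blockers : List String) (warnings : List String) : List String :=
  let f := blockers.foldl pvStep (false, false, false, false, false)
  let table : List (Bool × String) :=
    [(f.1, "Uzupelnij dane PIM (brand/title/ean/category) przed publikacja."),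
     (f.2.1, "Domknij parent-child na rynkach docelowych na bazie DE canonical."),
     (f.2.2.1, "Skonfiguruj SP-API credentials w ACC, bo gate restrictions/catalog jest natywny."),
     (f.2.2.2.1, "Rozwiaz ograniczenia listingowe (approval lub blokada) przed push."),
     (f.2.2.2.2, "Zweryfikuj dopasowanie katalogowe (ASIN/EAN) przed publikacja.")]
  let actions := (table.filter (fun p => p.1)).map (fun p => p.2)
  if actions = [] then ["Gotowe do produkcji draftu i review QA."] else actions

-- ===== PRECONDITION & SPEC =====
def Spec_preflight_recommendations_py (blockers : List String) (warnings : List String) (out : List String) : Prop := out = preflight_recommendations_py_alt blockers warnings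
instance (blockers : List String) (warnings : List String) (out : List String) : Decidable (Spec_preflight_recommendations_py blockers warnings out) := by unfold Spec_preflight_recommendations_py; infer_instance

-- ===== CLAIM (what is proved, stated in full; the proofs are below) =====
def Claim_equal_preflight_recommendations_py : Prop := ∀ (blockers : List String) (warnings : List String), Dom_preflight_recommendations_py blockers warnings → Spec_preflight_recommendations_py blockers warnings (preflight_recommendations_py blockers warnings)

-- ===== LEMMAS AND PROOFS =====

-- ===== VERDICT (by name: the statement is the Claim_ definition above) =====
lemma pvFold_eq (bs : List String) (f : Bool × Bool × Bool × Bool × Bool) :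
    bs.foldl pvStep f =
      (f.1 || bs.any (fun b => PySem.Str.isIn "missing_pim_data" b),
       f.2.1 || bs.any (fun b => PySem.Str.isIn "family_coverage" b),
       f.2.2.1 || bs.any (fun b => PySem.Str.isIn "spapi_not_configured" b),
       f.2.2.2.1 || bs.any (fun b => PySem.Str.isIn "listing_requires_approval" b || PySem.Str.isIn "listing_blocked" b),
       f.2.2.2.2 || bs.any (fun b => PySem.Str.isIn "catalog" b)) := by
  induction bs generalizing f with
  | nil => simp
  | cons b bs ih =>
    obtain ⟨f1, f2, f3, f4, f5⟩ := f
    simp only [List.foldl_cons, ih, List.any_cons, pvStep]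
    split_ifs <;> simp_all

theorem preflight_recommendations_py_spec : Claim_equal_preflight_recommendations_py := by
  intro blockers warnings _
  show preflight_recommendations_py blockers warnings = preflight_recommendations_py_alt blockers warnings
  unfold preflight_recommendations_py preflight_recommendations_py_alt
  rw [pvFold_eq]
  cases h1 : blockers.any (fun b => PySem.Str.isIn "missing_pim_data" b) <;>
  cases h2 : blockers.any (fun b => PySem.Str.isIn "family_coverage" b) <;>
  cases h3 : blockers.any (fun b => PySem.Str.isIn "spapi_not_configured" b) <;>
  cases h4 : blockers.any (fun b => PySem.Str.isIn "listing_requires_approval" b || PySem.Str.isIn "listing_blocked" b) <;>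
  cases h5 : blockers.any (fun b => PySem.Str.isIn "catalog" b) <;>
  simp
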